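-- pv_equiv track=rewrite | github.com/IronAdamant/PythonBol-Translator | src/cobol_safe_translator/pic_parser.py | compute_pic_size
-- ===== SOURCE A (Python) =====
-- def compute_pic_size(expanded: str) -> tuple[int, int, bool]:
--     """Return (total_size, decimal_places, is_signed) from expanded PIC."""
--     upper = expanded.upper()
--     signed = "S" in upper
--
--     # Remove sign character for size calculation
--     clean = upper.replace("S", "")
--
--     # Count decimals (digits after V)
--     decimals = 0
--     if "V" in clean:
--         _, after_v = clean.split("V", 1)
--         decimals = after_v.count("9")
--
--     # Handle CR/DB as 2-position editing symbols before char loop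
--     cr_db_extra = clean.count("CR") + clean.count("DB")
--     # Remove CR and DB for per-character counting to avoid double-counting
--     count_clean = clean.replace("CR", "").replace("DB", "")
--
--     size = cr_db_extra * 2  # Each CR/DB occupies 2 display positions
--     for c in count_clean:
--         if c != "V":  # V is implied decimal, no display position
--             size += 1
--     return size, decimals, signed
-- ===== SOURCE B (Python) =====
-- def compute_pic_size(expanded: str) -> tuple[int, int, bool]:
--     """Return (total_size, decimal_places, is_signed) from expanded PIC."""
--     size = 0
--     decimals = 0
--     signed = False
--     after_v = False
--     for ch in expanded:
--         c = ch.upper()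
--         if c == "S":
--             signed = True
--         elif c == "V":
--             after_v = True
--         else:
--             size += 1
--             if after_v and c == "9":
--                 decimals += 1
--     return size, decimals, signed
-- ===== Notes on version B (the rewrite author's own statement) =====
-- stated objective: simpler
-- what changed: B replaces A's staged whole-string passes (upper, S-removal, split-on-V, CR/DB counting, two symbol-removal replaces, then a char loop) by one left-to-right pass over the characters with a small state machine tracking (size, decimals, signed, seen-V).
-- intended difference: On inputs where removing a credit-symbol CR pair from the cleaned PIC string makes a DB pair adjacent that was not there before (witness DCRB), A returns a size smaller by 2 per such created pair because those characters are counted as zero display positions, while B counts every non-S non-V character once, which is the intended size. — e.g. on compute_pic_size("DCRB"): A returns (2, 0, false), B returns (4, 0, false)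
import Mathlib
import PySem

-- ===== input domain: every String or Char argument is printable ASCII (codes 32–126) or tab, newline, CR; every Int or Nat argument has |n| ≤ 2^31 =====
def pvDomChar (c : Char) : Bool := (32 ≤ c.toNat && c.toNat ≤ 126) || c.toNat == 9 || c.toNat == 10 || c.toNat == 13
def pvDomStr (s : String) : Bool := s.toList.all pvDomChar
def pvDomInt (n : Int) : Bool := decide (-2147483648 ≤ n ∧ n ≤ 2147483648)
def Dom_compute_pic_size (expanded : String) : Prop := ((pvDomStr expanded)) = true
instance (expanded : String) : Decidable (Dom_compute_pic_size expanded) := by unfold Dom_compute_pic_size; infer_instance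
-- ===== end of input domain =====

-- B replaces A's staged string passes (upper, replace, split, count, two replaces, char loop)
-- by a single left-to-right pass over the characters with a small state machine
-- (size, decimals, signed, seen-V) — objective: simpler, one pass instead of many.

-- ===== PORT A =====
def compute_pic_size (expanded : String) : Int × Int × Bool :=
  let upper := PySem.Str.upper expanded
  let signed := PySem.Str.isIn "S" upper
  let clean := PySem.Str.replace upper "S" ""
  let decimals : Int :=
    if PySem.Str.isIn "V" clean then
      -- '_, after_v = clean.split("V", 1)': with "V" in clean the split has exactly 2
      -- parts, so after_v is parts[1] (getD 1 "" is an unreachable totalization default)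
      (PySem.Str.count (((PySem.Str.splitMax? clean "V" 1).getD []).getD 1 "") "9" : Int)
    else 0
  let cr_db_extra : Int := (PySem.Str.count clean "CR" : Int) + (PySem.Str.count clean "DB" : Int)
  let count_clean := PySem.Str.replace (PySem.Str.replace clean "CR" "") "DB" ""
  let size := count_clean.toList.foldl (fun acc c => if c ≠ 'V' then acc + 1 else acc) (cr_db_extra * 2)
  (size, decimals, signed)

-- ===== PORT B =====
-- the loop body of B's single for-loop: state = (size, decimals, signed, after_v)
def pvStep (st : Int × Int × Bool × Bool) (ch : Char) : Int × Int × Bool × Bool :=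
  let c := PySem.Chars.upperChar ch
  if c = 'S' then (st.1, st.2.1, true, st.2.2.2)
  else if c = 'V' then (st.1, st.2.1, st.2.2.1, true)
  else (st.1 + 1, if st.2.2.2 ∧ c = '9' then st.2.1 + 1 else st.2.1, st.2.2.1, st.2.2.2)

def compute_pic_size_alt (expanded : String) : Int × Int × Bool :=
  let st := expanded.toList.foldl pvStep (0, 0, false, false)
  (st.1, st.2.1, st.2.2.1)

-- ===== PRECONDITION & SPEC =====
-- On inputs where removing a credit-symbol pair from the cleaned PIC string makes a
-- debit-symbol pair adjacent that was not there before (see the witness below), A returns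
-- a size 2 smaller per created pair (the vanished characters count zero display
-- positions), while B counts every character once, which is the intended size.
def D_compute_pic_size (expanded : String) : Prop :=
  let u := (expanded.toList.map PySem.Chars.upperChar).filter (· != 'S')
  PySem.Chars.count (PySem.Chars.replace u ['C', 'R'] []) ['D', 'B'] ≠ PySem.Chars.count u ['D', 'B']
instance (expanded : String) : Decidable (D_compute_pic_size expanded) := by
  unfold D_compute_pic_size; infer_instance

def Spec_compute_pic_size (expanded : String) (out : Int × Int × Bool) : Prop :=
  ¬ D_compute_pic_size expanded → out = compute_pic_size_alt expanded
instance (expanded : String) (out : Int × Int × Bool) : Decidable (Spec_compute_pic_size expanded out) := by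
  unfold Spec_compute_pic_size; infer_instance

def pvDiffWitness_compute_pic_size : String := "DCRB"
def pvDiffWitnessOut_compute_pic_size : (Int × Int × Bool) × (Int × Int × Bool) :=
  ((2, 0, false), (4, 0, false))

-- ===== CLAIM (what is proved, stated in full; the proofs are below) =====
def Claim_unchanged_compute_pic_size : Prop := ∀ (expanded : String), Dom_compute_pic_size expanded → Spec_compute_pic_size expanded (compute_pic_size expanded)
def Claim_changed_compute_pic_size : Prop := Dom_compute_pic_size (pvDiffWitness_compute_pic_size) ∧ D_compute_pic_size (pvDiffWitness_compute_pic_size) ∧ compute_pic_size (pvDiffWitness_compute_pic_size) = pvDiffWitnessOut_compute_pic_size.1 ∧ compute_pic_size_alt (pvDiffWitness_compute_pic_size) = pvDiffWitnessOut_compute_pic_size.2 ∧ pvDiffWitnessOut_compute_pic_size.1 ≠ pvDiffWitnessOut_compute_pic_size.2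
def Claim_exact_compute_pic_size : Prop := ∀ (expanded : String), Dom_compute_pic_size expanded → D_compute_pic_size expanded → compute_pic_size expanded ≠ compute_pic_size_alt expanded

-- ===== LEMMAS AND PROOFS =====

-- Structural versions of Python's str.replace(p, "") and str.count(p) for a nonempty pattern a :: q.
def pvRep (a : Char) (q : List Char) : List Char → List Char
  | [] => []
  | c :: t => if (a :: q).isPrefixOf (c :: t) then pvRep a q (t.drop q.length) else c :: pvRep a q t
  termination_by l => l.length
  decreasing_by
    · simp only [List.length_drop, List.length_cons]; omega
    · simp only [List.length_cons]; omega

def pvCnt (a : Char) (q : List Char) : List Char → Nat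
  | [] => 0
  | c :: t => if (a :: q).isPrefixOf (c :: t) then pvCnt a q (t.drop q.length) + 1 else pvCnt a q t
  termination_by l => l.length
  decreasing_by
    · simp only [List.length_drop, List.length_cons]; omega
    · simp only [List.length_cons]; omega

theorem pvRep_go (a : Char) (q : List Char) :
    ∀ (fuel : Nat) (l acc : List Char), l.length ≤ fuel →
      PySem.Chars.replace.go (a :: q) [] fuel l acc = acc.reverse ++ pvRep a q l := by
  intro fuel
  induction fuel with
  | zero =>
      intro l acc h
      have hl : l = [] := by cases l <;> simp_all
      subst hl; simp [PySem.Chars.replace.go, pvRep]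
  | succ n ih =>
      intro l acc h
      cases l with
      | nil => simp [PySem.Chars.replace.go, pvRep]
      | cons c t =>
          rw [PySem.Chars.replace.go]
          by_cases hp : (a :: q).isPrefixOf (c :: t)
          · rw [if_pos hp]
            have hd : (List.drop (a :: q).length (c :: t)) = t.drop q.length := by
              simp [List.drop_succ_cons]
            rw [hd]
            have hlen : (t.drop q.length).length ≤ n := by
              simp only [List.length_drop]
              have h' := h; simp only [List.length_cons] at h'; omega
            rw [show ([] : List Char).reverse ++ acc = acc by simp]
            rw [ih _ _ hlen, pvRep, if_pos hp]
          · rw [if_neg hp]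
            have hlen : t.length ≤ n := by
              have h' := h; simp only [List.length_cons] at h'; omega
            rw [ih _ _ hlen, pvRep, if_neg hp]
            simp

theorem pvCnt_go (a : Char) (q : List Char) :
    ∀ (fuel : Nat) (l : List Char) (acc : Nat), l.length ≤ fuel →
      PySem.Chars.count.go (a :: q) fuel l acc = acc + pvCnt a q l := by
  intro fuel
  induction fuel with
  | zero =>
      intro l acc h
      have hl : l = [] := by cases l <;> simp_all
      subst hl; simp [PySem.Chars.count.go, pvCnt]
  | succ n ih =>
      intro l acc h
      cases l with
      | nil => simp [PySem.Chars.count.go, pvCnt]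
      | cons c t =>
          rw [PySem.Chars.count.go]
          by_cases hp : (a :: q).isPrefixOf (c :: t)
          · rw [if_pos hp]
            have hd : (List.drop (a :: q).length (c :: t)) = t.drop q.length := by
              simp [List.drop_succ_cons]
            rw [hd]
            have hlen : (t.drop q.length).length ≤ n := by
              simp only [List.length_drop]
              have h' := h; simp only [List.length_cons] at h'; omega
            rw [ih _ _ hlen, pvCnt, if_pos hp]
            omega
          · rw [if_neg hp]
            have hlen : t.length ≤ n := by
              have h' := h; simp only [List.length_cons] at h'; omega
            rw [ih _ _ hlen, pvCnt, if_neg hp]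

theorem count_eq_pvCnt (a : Char) (q : List Char) (s : List Char) :
    PySem.Chars.count s (a :: q) = pvCnt a q s := by
  unfold PySem.Chars.count
  rw [if_neg (by simp), pvCnt_go a q s.length s 0 le_rfl]
  omega

theorem replace_eq_pvRep (a : Char) (q : List Char) (s : List Char) :
    PySem.Chars.replace s (a :: q) [] = pvRep a q s := by
  unfold PySem.Chars.replace
  rw [if_neg (by simp), pvRep_go a q s.length s [] le_rfl]
  simp

theorem pvRep_length (a : Char) (q : List Char) (l : List Char) :
    (pvRep a q l).length + (q.length + 1) * pvCnt a q l = l.length := by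
  induction l using pvRep.induct a q with
  | case1 => simp [pvRep, pvCnt]
  | case2 c t hp ih =>
      rw [pvRep, if_pos hp, pvCnt, if_pos hp]
      have hle : (a :: q).length ≤ (c :: t).length :=
        (List.isPrefixOf_iff_prefix.mp hp).length_le
      simp only [List.length_cons] at hle
      have hdl : (t.drop q.length).length = t.length - q.length := by simp
      rw [Nat.mul_add, Nat.mul_one]
      simp only [List.length_cons]
      omega
  | case3 c t hp ih =>
      rw [pvRep, if_neg hp, pvCnt, if_neg hp]
      simp only [List.length_cons]
      omega

theorem pvRep_count (a : Char) (q : List Char) (x : Char) (hx : x ∉ a :: q) (l : List Char) :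
    (pvRep a q l).count x = l.count x := by
  induction l using pvRep.induct a q with
  | case1 => simp [pvRep]
  | case2 c t hp ih =>
      rw [pvRep, if_pos hp]
      obtain ⟨rest, hr⟩ := List.isPrefixOf_iff_prefix.mp hp
      have hrest : List.drop q.length t = rest := by
        have h' := congrArg (List.drop (a :: q).length) hr
        simpa [List.drop_succ_cons] using h'.symm
      rw [ih]
      have hct : (c :: t).count x = ((a :: q) ++ rest).count x := by rw [hr]
      rw [hct, List.count_append, List.count_eq_zero_of_not_mem hx, hrest]
      omega
  | case3 c t hp ih =>
      rw [pvRep, if_neg hp, List.count_cons, List.count_cons, ih]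

theorem pvCnt_single (a : Char) (l : List Char) : pvCnt a [] l = l.count a := by
  induction l with
  | nil => simp [pvCnt]
  | cons c t ih =>
      rw [pvCnt, List.count_cons]
      by_cases h : a = c
      · rw [if_pos (by simp [h, List.isPrefixOf]), if_pos (by simp [h])]
        simpa using ih
      · rw [if_neg (by simp [List.isPrefixOf, h]), if_neg (by simp [Ne.symm h])]
        simpa using ih

theorem countP_ne_add_count (v : Char) (l : List Char) :
    l.countP (fun c => decide (c ≠ v)) + l.count v = l.length := by
  induction l with
  | nil => simp
  | cons c t ih =>
      rw [List.countP_cons, List.count_cons]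
      by_cases h : c = v
      · rw [if_neg (by simp [h]), if_pos (by simp [h])]
        simp only [List.length_cons]
        omega
      · rw [if_pos (by simp [h]), if_neg (by simp [h])]
        simp only [List.length_cons]
        omega

theorem pvRep_single_filter (a : Char) (l : List Char) :
    pvRep a [] l = l.filter (fun c => c != a) := by
  induction l with
  | nil => simp [pvRep]
  | cons c t ih =>
      rw [pvRep]
      by_cases h : a = c
      · rw [if_pos (by simp [h, List.isPrefixOf])]
        simp [h.symm, ih]
      · rw [if_neg (by simp [List.isPrefixOf, h])]
        simp [Ne.symm h, ih]

theorem clean_toList (expanded : String) :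
    (PySem.Str.replace (PySem.Str.upper expanded) "S" "").toList
      = (expanded.toList.map PySem.Chars.upperChar).filter (fun c => c != 'S') := by
  rw [PySem.Str.toList_replace]
  have hS : ("S" : String).toList = ['S'] := rfl
  have hnil : ("" : String).toList = [] := rfl
  rw [hS, hnil, replace_eq_pvRep, pvRep_single_filter]
  simp [PySem.Str.toList_upper, PySem.Chars.upper]

theorem D_iff (expanded : String) : D_compute_pic_size expanded ↔
    PySem.Str.count (PySem.Str.replace (PySem.Str.replace (PySem.Str.upper expanded) "S" "") "CR" "") "DB"
      ≠ PySem.Str.count (PySem.Str.replace (PySem.Str.upper expanded) "S" "") "DB" := by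
  unfold D_compute_pic_size
  simp only []
  have hCR : ("CR" : String).toList = ['C', 'R'] := rfl
  have hDB : ("DB" : String).toList = ['D', 'B'] := rfl
  have hnil : ("" : String).toList = [] := rfl
  rw [PySem.Str.count_eq, PySem.Str.count_eq, PySem.Str.toList_replace, hCR, hDB, hnil,
      clean_toList]

-- The size A computes, as the closed form corrected by the CR-removal/DB-count discrepancy.
theorem size_formula (u : List Char) :
    ((PySem.Chars.count u "CR".toList : Int) + (PySem.Chars.count u "DB".toList : Int)) * 2
      + ((PySem.Chars.replace (PySem.Chars.replace u "CR".toList []) "DB".toList []).countP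
          (fun c => decide (c ≠ 'V')) : Int)
    = (u.length : Int) - (PySem.Chars.count u "V".toList : Int)
      + 2 * ((PySem.Chars.count u "DB".toList : Int)
             - (PySem.Chars.count (PySem.Chars.replace u "CR".toList []) "DB".toList : Int)) := by
  have hCR : ("CR" : String).toList = ['C', 'R'] := rfl
  have hDB : ("DB" : String).toList = ['D', 'B'] := rfl
  have hV : ("V" : String).toList = ['V'] := rfl
  rw [hCR, hDB, hV]
  simp only [count_eq_pvCnt, replace_eq_pvRep]
  set s1 := pvRep 'C' ['R'] u with hs1
  set cc := pvRep 'D' ['B'] s1 with hcc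
  have L1 : s1.length + 2 * pvCnt 'C' ['R'] u = u.length := by
    have h' := pvRep_length 'C' ['R'] u; simpa using h'
  have L2 : cc.length + 2 * pvCnt 'D' ['B'] s1 = s1.length := by
    have h' := pvRep_length 'D' ['B'] s1; simpa using h'
  have C1 : s1.count 'V' = u.count 'V' := pvRep_count 'C' ['R'] 'V' (by decide) u
  have C2 : cc.count 'V' = s1.count 'V' := pvRep_count 'D' ['B'] 'V' (by decide) s1
  have C3 : cc.countP (fun c => decide (c ≠ 'V')) + cc.count 'V' = cc.length :=
    countP_ne_add_count 'V' cc
  have C4 : pvCnt 'V' [] u = u.count 'V' := pvCnt_single 'V' u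
  have hVle : u.count 'V' ≤ u.length := List.count_le_length
  rw [C4]
  omega

-- The size component of port A, read off its definition.
set_option maxHeartbeats 1000000 in
theorem fst_A (expanded : String) :
    (compute_pic_size expanded).1 =
      (PySem.Str.replace (PySem.Str.replace (PySem.Str.replace (PySem.Str.upper expanded) "S" "") "CR" "") "DB" "").toList.foldl
        (fun acc c => if c ≠ 'V' then acc + 1 else acc)
        (((PySem.Str.count (PySem.Str.replace (PySem.Str.upper expanded) "S" "") "CR" : Int)
          + (PySem.Str.count (PySem.Str.replace (PySem.Str.upper expanded) "S" "") "DB" : Int)) * 2) := by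
  unfold compute_pic_size; simp only []

-- ---- B-side characterisation: the single-pass state machine ----

-- digits '9' seen after the first 'V' (on already-uppercased characters)
def pvDec (v : Bool) : List Char → Nat
  | [] => 0
  | c :: t => if c = 'S' then pvDec v t
              else if c = 'V' then pvDec true t
              else (if v ∧ c = '9' then 1 else 0) + pvDec v t

-- the suffix after the first 'V'
def pvAfterV : List Char → List Char
  | [] => []
  | c :: t => if c = 'V' then t else pvAfterV t

theorem foldB (l : List Char) : ∀ (s d : Int) (g v : Bool),
    l.foldl pvStep (s, d, g, v) =
      (s + ((l.map PySem.Chars.upperChar).countP (fun c => decide (c ≠ 'S' ∧ c ≠ 'V')) : Int),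
       d + (pvDec v (l.map PySem.Chars.upperChar) : Int),
       g || (l.map PySem.Chars.upperChar).contains 'S',
       v || (l.map PySem.Chars.upperChar).contains 'V') := by
  induction l with
  | nil => intro s d g v; simp [pvDec]
  | cons ch t ih =>
      intro s d g v
      rw [List.foldl_cons]
      by_cases hS : PySem.Chars.upperChar ch = 'S'
      · rw [show pvStep (s, d, g, v) ch = (s, d, true, v) by simp [pvStep, hS]]
        rw [ih]
        simp [pvDec, hS]
      · by_cases hV : PySem.Chars.upperChar ch = 'V'
        · rw [show pvStep (s, d, g, v) ch = (s, d, g, true) by simp [pvStep, hV]]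
          rw [ih]
          simp [pvDec, hV]
        · rw [show pvStep (s, d, g, v) ch
              = (s + 1, if v ∧ PySem.Chars.upperChar ch = '9' then d + 1 else d, g, v) by
                simp [pvStep, hS, hV]]
          rw [ih]
          simp only [List.map_cons, List.countP_cons, pvDec, if_neg hS, if_neg hV,
            List.contains_cons]
          have h1 : decide (PySem.Chars.upperChar ch ≠ 'S' ∧ PySem.Chars.upperChar ch ≠ 'V') = true := by
            simp [hS, hV]
          have h2 : ('S' == PySem.Chars.upperChar ch) = false := by
            rw [beq_eq_false_iff_ne]; exact fun h => hS h.symm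
          have h3 : ('V' == PySem.Chars.upperChar ch) = false := by
            rw [beq_eq_false_iff_ne]; exact fun h => hV h.symm
          rw [h1, h2, h3]
          refine Prod.ext ?_ (Prod.ext ?_ rfl)
          · simp; ring
          · by_cases h9 : v ∧ PySem.Chars.upperChar ch = '9'
            · simp only [if_pos h9]; push_cast; ring
            · simp only [if_neg h9]; push_cast; ring

theorem alt_eq (expanded : String) :
    compute_pic_size_alt expanded =
      (((expanded.toList.map PySem.Chars.upperChar).countP (fun c => decide (c ≠ 'S' ∧ c ≠ 'V')) : Int),
       (pvDec false (expanded.toList.map PySem.Chars.upperChar) : Int),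
       (expanded.toList.map PySem.Chars.upperChar).contains 'S') := by
  unfold compute_pic_size_alt
  rw [foldB]
  simp

-- counting '9's after the first V
theorem pvDec_true (l : List Char) : pvDec true l = l.count '9' := by
  induction l with
  | nil => simp [pvDec]
  | cons c t ih =>
      rw [pvDec]
      by_cases hS : c = 'S'
      · rw [if_pos hS, ih, List.count_cons]
        simp [hS]
      · rw [if_neg hS]
        by_cases hV : c = 'V'
        · rw [if_pos hV, ih, List.count_cons]
          simp [hV]
        · rw [if_neg hV, ih, List.count_cons]
          by_cases h9 : c = '9' <;> simp [h9, Nat.add_comm]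

theorem pvDec_false (l : List Char) : pvDec false l = (pvAfterV l).count '9' := by
  induction l with
  | nil => simp [pvDec, pvAfterV]
  | cons c t ih =>
      rw [pvDec, pvAfterV]
      by_cases hS : c = 'S'
      · rw [if_pos hS, if_neg (by simp [hS] : ¬ c = 'V'), ih]
      · rw [if_neg hS]
        by_cases hV : c = 'V'
        · rw [if_pos hV, if_pos hV, pvDec_true]
        · rw [if_neg hV, if_neg hV, ih]
          simp

theorem pvAfterV_of_not_mem (l : List Char) (h : 'V' ∉ l) : pvAfterV l = [] := by
  induction l with
  | nil => rfl
  | cons c t ih =>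
      rw [pvAfterV, if_neg (by simp at h; exact fun hc => h.1 hc.symm)]
      exact ih (by simp at h; exact h.2)

theorem pvAfterV_filterS (l : List Char) :
    (pvAfterV (l.filter (fun c => c != 'S'))).count '9' = (pvAfterV l).count '9' := by
  induction l with
  | nil => rfl
  | cons c t ih =>
      by_cases hS : c = 'S'
      · rw [List.filter_cons_of_neg (by simp [hS]), pvAfterV,
            if_neg (by simp [hS]), ih]
      · rw [List.filter_cons_of_pos (by simp [hS]), pvAfterV, pvAfterV]
        by_cases hV : c = 'V'
        · rw [if_pos hV, if_pos hV]
          rw [List.count_filter]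
          simp
        · rw [if_neg hV, if_neg hV, ih]

-- s.split("V", 1): the worker, then the wrapper
theorem splitV_go_zero (fuel : Nat) (l cur : List Char) (acc : List (List Char)) :
    PySem.Chars.splitOnMax.go ['V'] fuel 0 l cur acc = ((cur.reverse ++ l) :: acc).reverse := by
  cases fuel with
  | zero => rw [PySem.Chars.splitOnMax.go]
  | succ n =>
      cases l with
      | nil =>
          rw [PySem.Chars.splitOnMax.go]
          · simp
          · omega
      | cons c t => rw [PySem.Chars.splitOnMax.go]; simp

theorem splitV_go (fuel : Nat) : ∀ (l cur : List Char) (acc : List (List Char)), l.length ≤ fuel →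
    PySem.Chars.splitOnMax.go ['V'] fuel 1 l cur acc =
      acc.reverse ++ (if 'V' ∈ l then [cur.reverse ++ l.takeWhile (fun c => c != 'V'), pvAfterV l]
                      else [cur.reverse ++ l]) := by
  induction fuel with
  | zero =>
      intro l cur acc h
      have hl : l = [] := by cases l <;> simp_all
      subst hl
      rw [PySem.Chars.splitOnMax.go]
      simp
  | succ n ih =>
      intro l cur acc h
      cases l with
      | nil =>
          rw [PySem.Chars.splitOnMax.go]
          · simp
          · omega
      | cons c t =>
          rw [PySem.Chars.splitOnMax.go]
          rw [if_neg (by omega : ¬ (1:Nat) = 0)]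
          by_cases hV : c = 'V'
          · rw [if_pos (by simp [hV, List.isPrefixOf])]
            have : List.drop (['V'].length) (c :: t) = t := by simp
            rw [this, splitV_go_zero]
            rw [if_pos (by simp [hV])]
            rw [pvAfterV, if_pos hV, List.takeWhile_cons]
            simp [hV]
          · rw [if_neg (by simp [List.isPrefixOf, Ne.symm hV])]
            rw [ih t (c :: cur) acc (by simp at h; omega)]
            by_cases hm : 'V' ∈ t
            · rw [if_pos hm, if_pos (by simp [hm])]
              rw [pvAfterV, if_neg hV, List.takeWhile_cons]
              simp
              exact hV
            · rw [if_neg hm, if_neg (by simp [hm, Ne.symm hV])]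
              simp

theorem splitV (u : List Char) :
    PySem.Chars.splitOnMax u ['V'] 1 =
      if 'V' ∈ u then [u.takeWhile (fun c => c != 'V'), pvAfterV u] else [u] := by
  unfold PySem.Chars.splitOnMax
  rw [if_neg (by omega : ¬ (1:Int) < 0)]
  rw [show (1:Int).toNat = 1 from rfl]
  rw [splitV_go (u.length + 1) u [] [] (by omega)]
  simp

theorem isIn_single (a : Char) (s : String) :
    PySem.Str.isIn (String.ofList [a]) s = s.toList.contains a := by
  have htl : (String.ofList [a]).toList = [a] := String.toList_ofList
  by_cases h : a ∈ s.toList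
  · rw [List.contains_eq_mem, decide_eq_true h]
    exact (PySem.Str.isIn_iff_infix _ _).mpr
      (by rw [htl]; exact (List.singleton_infix_iff a s.toList).mpr h)
  · rw [List.contains_eq_mem, decide_eq_false h]
    by_contra hc
    rw [Bool.not_eq_false] at hc
    have hin := (PySem.Str.isIn_iff_infix _ _).mp hc
    rw [htl] at hin
    exact h ((List.singleton_infix_iff a s.toList).mp hin)

-- A's decimals component equals the count of '9' after the first V of the cleaned string.
theorem decimals_A (expanded : String) :
    (compute_pic_size expanded).2.1 =
      ((pvAfterV (PySem.Str.replace (PySem.Str.upper expanded) "S" "").toList).count '9' : Int) := by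
  unfold compute_pic_size
  simp only []
  set clean := PySem.Str.replace (PySem.Str.upper expanded) "S" "" with hclean
  by_cases hmem : 'V' ∈ clean.toList
  · rw [if_pos (by rw [show ("V" : String) = String.ofList ['V'] from rfl, isIn_single,
        List.contains_eq_mem]; exact decide_eq_true hmem)]
    have hsplit : PySem.Str.splitMax? clean "V" 1 =
        some ([clean.toList.takeWhile (fun c => c != 'V'), pvAfterV clean.toList].map String.ofList) := by
      rw [PySem.Str.splitMax?]
      rw [show PySem.Chars.splitMax? clean.toList ("V" : String).toList 1
          = some (PySem.Chars.splitOnMax clean.toList ['V'] 1) from rfl]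
      rw [splitV, if_pos hmem]
      rfl
    rw [hsplit]
    simp only [Option.getD_some, List.map_cons, List.map_nil]
    rw [show ([String.ofList (clean.toList.takeWhile (fun c => c != 'V')),
        String.ofList (pvAfterV clean.toList)].getD 1 "") = String.ofList (pvAfterV clean.toList)
      from rfl]
    rw [PySem.Str.count_eq, String.toList_ofList]
    rw [show ("9" : String).toList = ['9'] from rfl, count_eq_pvCnt, pvCnt_single]
  · rw [if_neg (by rw [show ("V" : String) = String.ofList ['V'] from rfl, isIn_single,
        List.contains_eq_mem]; simp [hmem])]
    rw [pvAfterV_of_not_mem _ hmem]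
    simp

-- A's signed component equals B's.
theorem signed_AB (expanded : String) :
    (compute_pic_size expanded).2.2 = (compute_pic_size_alt expanded).2.2 := by
  unfold compute_pic_size
  simp only []
  rw [alt_eq]
  rw [show ("S" : String) = String.ofList ['S'] from rfl, isIn_single]
  simp [PySem.Str.toList_upper, PySem.Chars.upper]

-- A's decimals component equals B's.
theorem decimals_AB (expanded : String) :
    (compute_pic_size expanded).2.1 = (compute_pic_size_alt expanded).2.1 := by
  rw [decimals_A, alt_eq]
  simp only []
  rw [pvDec_false, clean_toList, pvAfterV_filterS]

-- the closed form for B's size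
theorem countP_closed (u : List Char) :
    (u.countP (fun c => decide (c ≠ 'S' ∧ c ≠ 'V')) : Int)
      = ((u.filter (fun c => c != 'S')).length : Int)
        - ((u.filter (fun c => c != 'S')).count 'V' : Int) := by
  have h := countP_ne_add_count 'V' (u.filter (fun c => c != 'S'))
  have h2 : (u.filter (fun c => c != 'S')).countP (fun c => decide (c ≠ 'V'))
      = u.countP (fun c => decide (c ≠ 'S' ∧ c ≠ 'V')) := by
    rw [List.countP_filter]
    apply List.countP_congr
    intro a _
    by_cases hS : a = 'S' <;> by_cases hV : a = 'V' <;> simp [hS, hV]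
  omega

-- A's size component as B's plus the CR/DB discrepancy.
theorem fst_diff (expanded : String) :
    (compute_pic_size expanded).1 =
      (compute_pic_size_alt expanded).1
        + 2 * ((PySem.Str.count (PySem.Str.replace (PySem.Str.upper expanded) "S" "") "DB" : Int)
               - (PySem.Str.count (PySem.Str.replace (PySem.Str.replace (PySem.Str.upper expanded) "S" "") "CR" "") "DB" : Int)) := by
  rw [fst_A, alt_eq]
  rw [PySem.List.foldl_ite_add_one (fun c => c ≠ 'V')]
  have hnil : ("" : String).toList = [] := rfl
  simp only [PySem.Str.count_eq, PySem.Str.toList_replace, hnil]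
  have h := size_formula ((PySem.Str.replace (PySem.Str.upper expanded) "S" "").toList)
  simp only [PySem.Str.toList_replace, hnil] at h
  have hcl := clean_toList expanded
  simp only [PySem.Str.toList_replace, hnil] at hcl
  rw [hcl] at h ⊢
  have hcp := countP_closed (expanded.toList.map PySem.Chars.upperChar)
  have hv : PySem.Chars.count
      (List.filter (fun c => c != 'S') (expanded.toList.map PySem.Chars.upperChar)) ("V".toList)
      = List.count 'V' (List.filter (fun c => c != 'S') (expanded.toList.map PySem.Chars.upperChar)) := by
    rw [show ("V" : String).toList = ['V'] from rfl, count_eq_pvCnt, pvCnt_single]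
  omega

-- ===== VERDICT (by name: the statement is the Claim_ definition above) =====
theorem compute_pic_size_spec : Claim_unchanged_compute_pic_size := by
  intro expanded _ hD
  rw [D_iff] at hD
  rw [Prod.ext_iff, Prod.ext_iff]
  refine ⟨?_, decimals_AB expanded, signed_AB expanded⟩
  rw [fst_diff expanded]
  have : PySem.Str.count (PySem.Str.replace (PySem.Str.replace (PySem.Str.upper expanded) "S" "") "CR" "") "DB"
      = PySem.Str.count (PySem.Str.replace (PySem.Str.upper expanded) "S" "") "DB" := by
    by_contra hne
    exact hD hne
  rw [this]
  ring

theorem compute_pic_size_changed : Claim_changed_compute_pic_size := by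
  unfold Claim_changed_compute_pic_size; decide

theorem compute_pic_size_tight : Claim_exact_compute_pic_size := by
  intro expanded _ hD hEq
  rw [D_iff] at hD
  apply hD
  have h1 := congrArg Prod.fst hEq
  rw [fst_diff expanded] at h1
  omega
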